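-- pv_equiv track=rewrite | github.com/KentHsu/Cracking | Ch04/Heap.py | isHeap
-- ===== SOURCE A (Python) =====
-- def isHeap(heap):
-- 	for i in range(len(heap)):
-- 		try:
-- 			for j in (2 * i + 1, 2 * i + 2):
-- 				if heap[i] > heap[j]:
-- 					return False
-- 		except IndexError:
-- 			pass
-- 	return True
-- ===== SOURCE B (Python) =====
-- def isHeap(heap):
--     n = len(heap)
--
--     def ok(i):
--         if i >= n:
--             return True
--         left, right = 2 * i + 1, 2 * i + 2
--         if left < n and heap[left] < heap[i]:
--             return False
--         if right < n and heap[right] < heap[i]: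
--             return False
--         return ok(left) and ok(right)
--
--     return ok(0)
-- ===== Notes on version B (the rewrite author's own statement) =====
-- stated objective: alternative
-- what changed: B checks the heap property by recursive depth-first descent over the implicit binary tree: ok(i) compares node i with its in-range children and recurses into both subtrees, replacing A's flat index loop with a two-child tuple inner loop guarded by try/except IndexError.
import Mathlib
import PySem

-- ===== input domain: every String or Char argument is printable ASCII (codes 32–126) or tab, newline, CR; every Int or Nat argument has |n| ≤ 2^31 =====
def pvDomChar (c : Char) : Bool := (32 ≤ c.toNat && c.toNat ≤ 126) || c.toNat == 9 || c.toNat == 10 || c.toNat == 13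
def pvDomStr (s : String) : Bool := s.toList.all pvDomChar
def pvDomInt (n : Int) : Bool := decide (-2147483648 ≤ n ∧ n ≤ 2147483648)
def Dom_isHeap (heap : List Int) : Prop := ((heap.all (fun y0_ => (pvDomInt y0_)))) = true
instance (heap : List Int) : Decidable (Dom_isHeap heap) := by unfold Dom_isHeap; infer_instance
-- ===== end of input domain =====

-- B replaces A's flat parent-indexed loop (two-child tuple loop + try/except IndexError) by a
-- recursive depth-first check over the implicit binary tree; objective: alternative decomposition.

-- ===== PORT A =====
-- for i in range(len(heap)): try: for j in (2i+1, 2i+2): if heap[i] > heap[j]: return False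
-- except IndexError: pass.  heap[i] has i < len from the loop, so List.getD's default is never used;
-- heap[j] may raise IndexError, ported as PySem.List.pyGet? (none = IndexError → inner loop aborted, pass).
def isHeapGo (heap : List Int) (i : Nat) : Bool :=
  if _h : i < heap.length then
    match PySem.List.pyGet? heap (2 * (i : Int) + 1) with
    | none => isHeapGo heap (i + 1)            -- IndexError on first child: except → pass
    | some v1 =>
      if heap.getD i 0 > v1 then false
      else
        match PySem.List.pyGet? heap (2 * (i : Int) + 2) with
        | none => isHeapGo heap (i + 1)        -- IndexError on second child: except → pass
        | some v2 => if heap.getD i 0 > v2 then false else isHeapGo heap (i + 1)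
  else true
termination_by heap.length - i

def isHeap (heap : List Int) : Bool := isHeapGo heap 0

-- ===== PORT B =====
-- n = len(heap); ok(i): if i >= n: True; if left < n and heap[left] < heap[i]: False;
-- if right < n and heap[right] < heap[i]: False; return ok(left) and ok(right); return ok(0).
-- The short-circuit 'left < n and …' guarantees both indices are in range, so getD's default is never used.
def isHeapOk (heap : List Int) (i : Nat) : Bool :=
  if _h : i < heap.length then
    if 2 * i + 1 < heap.length ∧ heap.getD (2 * i + 1) 0 < heap.getD i 0 then false
    else if 2 * i + 2 < heap.length ∧ heap.getD (2 * i + 2) 0 < heap.getD i 0 then false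
    else isHeapOk heap (2 * i + 1) && isHeapOk heap (2 * i + 2)
  else true
termination_by heap.length - i

def isHeap_alt (heap : List Int) : Bool := isHeapOk heap 0

-- ===== PRECONDITION & SPEC =====
def Spec_isHeap (heap : List Int) (out : Bool) : Prop := out = isHeap_alt heap
instance (heap : List Int) (out : Bool) : Decidable (Spec_isHeap heap out) := by unfold Spec_isHeap; infer_instance

-- ===== CLAIM (what is proved, stated in full; the proofs are below) =====
def Claim_equal_isHeap : Prop := ∀ (heap : List Int), Dom_isHeap heap → Spec_isHeap heap (isHeap heap)

-- ===== LEMMAS AND PROOFS =====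

-- p lies in the subtree of the implicit binary tree rooted at i
inductive Desc : Nat → Nat → Prop
  | refl (i : Nat) : Desc i i
  | left {i p : Nat} : Desc (2 * i + 1) p → Desc i p
  | right {i p : Nat} : Desc (2 * i + 2) p → Desc i p

theorem Desc_le {i p : Nat} (h : Desc i p) : i ≤ p := by
  induction h with
  | refl => exact le_refl _
  | left _ ih => omega
  | right _ ih => omega

theorem Desc_trans {a b c : Nat} (h1 : Desc a b) (h2 : Desc b c) : Desc a c := by
  induction h1 with
  | refl => exact h2
  | left _ ih => exact Desc.left (ih h2)
  | right _ ih => exact Desc.right (ih h2)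

theorem Desc_zero (p : Nat) : Desc 0 p := by
  induction p using Nat.strong_induction_on with
  | _ p ih =>
    by_cases hp : p = 0
    · subst hp; exact Desc.refl 0
    · obtain ⟨q, hq, hcase⟩ : ∃ q, q < p ∧ (p = 2 * q + 1 ∨ p = 2 * q + 2) :=
        ⟨(p - 1) / 2, by omega, by omega⟩
      have h0q := ih q hq
      have hqp : Desc q p := by
        rcases hcase with h | h
        · rw [h]; exact Desc.left (Desc.refl _)
        · rw [h]; exact Desc.right (Desc.refl _)
      exact Desc_trans h0q hqp

theorem pyGet?_child1 (heap : List Int) (i : Nat) :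
    PySem.List.pyGet? heap (2 * (i : Int) + 1) = heap[2 * i + 1]? := by
  rw [show (2 * (i : Int) + 1) = ((2 * i + 1 : Nat) : Int) by push_cast; ring]
  exact PySem.List.pyGet?_natCast heap _

theorem pyGet?_child2 (heap : List Int) (i : Nat) :
    PySem.List.pyGet? heap (2 * (i : Int) + 2) = heap[2 * i + 2]? := by
  rw [show (2 * (i : Int) + 2) = ((2 * i + 2 : Nat) : Int) by push_cast; ring]
  exact PySem.List.pyGet?_natCast heap _

theorem okGo_iff (heap : List Int) (i : Nat) :
    isHeapOk heap i = true ↔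
      ∀ p, Desc i p → p < heap.length →
        (2 * p + 1 < heap.length → heap.getD p 0 ≤ heap.getD (2 * p + 1) 0) ∧
        (2 * p + 2 < heap.length → heap.getD p 0 ≤ heap.getD (2 * p + 2) 0) := by
  rw [isHeapOk]
  split
  · rename_i h
    split
    · rename_i h1
      simp only [Bool.false_eq_true, false_iff]
      intro hall
      have := (hall i (Desc.refl i) h).1 h1.1
      have := h1.2
      omega
    · rename_i h1
      split
      · rename_i h2
        simp only [Bool.false_eq_true, false_iff]
        intro hall
        have := (hall i (Desc.refl i) h).2 h2.1
        have := h2.2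
        omega
      · rename_i h2
        rw [Bool.and_eq_true, okGo_iff heap (2 * i + 1), okGo_iff heap (2 * i + 2)]
        constructor
        · rintro ⟨hl, hr⟩ p hd hp
          cases hd with
          | refl =>
            refine ⟨fun hc => ?_, fun hc => ?_⟩
            · by_contra hlt
              exact h1 ⟨hc, by omega⟩
            · by_contra hlt
              exact h2 ⟨hc, by omega⟩
          | left hd' => exact hl p hd' hp
          | right hd' => exact hr p hd' hp
        · intro hall
          exact ⟨fun p hd hp => hall p (Desc.left hd) hp,
                 fun p hd hp => hall p (Desc.right hd) hp⟩
  · rename_i h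
    simp only [true_iff]
    intro p hd hp
    have := Desc_le hd
    omega
termination_by heap.length - i

theorem aGo_iff (heap : List Int) (i : Nat) :
    isHeapGo heap i = true ↔
      ∀ p c, i ≤ p → (c = 2 * p + 1 ∨ c = 2 * p + 2) → c < heap.length →
        heap.getD p 0 ≤ heap.getD c 0 := by
  rw [isHeapGo]
  split
  · rename_i h
    rcases hg1 : PySem.List.pyGet? heap (2 * (i : Int) + 1) with _ | v1
    · -- first child out of range ⇒ both children out of range for parent i
      rw [pyGet?_child1] at hg1
      have hlen : ¬ 2 * i + 1 < heap.length := by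
        intro hc; rw [List.getElem?_eq_getElem hc] at hg1; simp at hg1
      rw [aGo_iff heap (i + 1)]
      constructor
      · intro ih p c hip hc hclen
        rcases Nat.eq_or_lt_of_le hip with rfl | hlt
        · omega
        · exact ih p c hlt hc hclen
      · intro hall p c hip hc hclen; exact hall p c (by omega) hc hclen
    · simp only []
      rw [pyGet?_child1] at hg1
      have h1len : 2 * i + 1 < heap.length := by
        by_contra hc
        rw [List.getElem?_eq_none (by omega)] at hg1; simp at hg1
      have hv1 : v1 = heap.getD (2 * i + 1) 0 := by
        rw [List.getElem?_eq_getElem h1len] at hg1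
        rw [List.getD_eq_getElem heap 0 h1len]
        exact (Option.some_inj.mp hg1).symm
      by_cases hgt : heap.getD i 0 > v1
      · rw [if_pos hgt]
        simp only [Bool.false_eq_true, false_iff]
        push Not
        exact ⟨i, 2 * i + 1, le_refl _, Or.inl rfl, h1len, by omega⟩
      · rw [if_neg hgt]
        have hle1 : ¬ heap.getD i 0 > v1 := hgt
        rcases hg2 : PySem.List.pyGet? heap (2 * (i : Int) + 2) with _ | v2
        · rw [pyGet?_child2] at hg2
          have h2len : ¬ 2 * i + 2 < heap.length := by
            intro hc; rw [List.getElem?_eq_getElem hc] at hg2; simp at hg2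
          rw [aGo_iff heap (i + 1)]
          constructor
          · intro ih p c hip hc hclen
            rcases Nat.eq_or_lt_of_le hip with rfl | hlt
            · rcases hc with rfl | rfl
              · rw [hv1] at hle1; omega
              · omega
            · exact ih p c hlt hc hclen
          · intro hall p c hip hc hclen; exact hall p c (by omega) hc hclen
        · simp only []
          rw [pyGet?_child2] at hg2
          have h2len : 2 * i + 2 < heap.length := by
            by_contra hc
            rw [List.getElem?_eq_none (by omega)] at hg2; simp at hg2
          have hv2 : v2 = heap.getD (2 * i + 2) 0 := by
            rw [List.getElem?_eq_getElem h2len] at hg2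
            rw [List.getD_eq_getElem heap 0 h2len]
            exact (Option.some_inj.mp hg2).symm
          by_cases hgt2 : heap.getD i 0 > v2
          · rw [if_pos hgt2]
            simp only [Bool.false_eq_true, false_iff]
            push Not
            exact ⟨i, 2 * i + 2, le_refl _, Or.inr rfl, h2len, by omega⟩
          · rw [if_neg hgt2]
            have hle2 : ¬ heap.getD i 0 > v2 := hgt2
            rw [aGo_iff heap (i + 1)]
            constructor
            · intro ih p c hip hc hclen
              rcases Nat.eq_or_lt_of_le hip with rfl | hlt
              · rcases hc with rfl | rfl
                · rw [hv1] at hle1; omega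
                · rw [hv2] at hle2; omega
              · exact ih p c hlt hc hclen
            · intro hall p c hip hc hclen; exact hall p c (by omega) hc hclen
  · rename_i h
    simp only [true_iff]
    intro p c hip hc hclen
    omega
termination_by heap.length - i

theorem props_iff (heap : List Int) :
    (∀ p c, 0 ≤ p → (c = 2 * p + 1 ∨ c = 2 * p + 2) → c < heap.length →
        heap.getD p 0 ≤ heap.getD c 0) ↔
    (∀ p, Desc 0 p → p < heap.length →
        (2 * p + 1 < heap.length → heap.getD p 0 ≤ heap.getD (2 * p + 1) 0) ∧
        (2 * p + 2 < heap.length → heap.getD p 0 ≤ heap.getD (2 * p + 2) 0)) := by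
  constructor
  · intro hA p _ _
    exact ⟨fun hc => hA p _ (Nat.zero_le _) (Or.inl rfl) hc,
           fun hc => hA p _ (Nat.zero_le _) (Or.inr rfl) hc⟩
  · intro hB p c _ hc hclen
    have hp : p < heap.length := by omega
    have := hB p (Desc_zero p) hp
    rcases hc with rfl | rfl
    · exact this.1 hclen
    · exact this.2 hclen

-- ===== VERDICT (by name: the statement is the Claim_ definition above) =====
theorem isHeap_spec : Claim_equal_isHeap := by
  intro heap _
  unfold Spec_isHeap isHeap isHeap_alt
  have hA := aGo_iff heap 0
  have hB := okGo_iff heap 0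
  cases ha : isHeapGo heap 0 <;> cases hb : isHeapOk heap 0
  · rfl
  · exfalso
    rw [ha] at hA
    simp only [Bool.false_eq_true, false_iff] at hA
    exact hA ((props_iff heap).mpr (hB.mp hb))
  · exfalso
    rw [hb] at hB
    simp only [Bool.false_eq_true, false_iff] at hB
    exact hB ((props_iff heap).mp (hA.mp ha))
  · rfl
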